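-- pv_equiv track=rewrite | github.com/BackupTheBerlios/mpy-svn-stats-svn | trunk/db.py | __convert_params_pyformat
-- ===== SOURCE A (Python) =====
-- import string
--
-- def __convert_params_pyformat(sql, params):
--     template = string.Template(sql)
--     matches = template.pattern.findall(template.template)
--     sql_pyformat_repl = {}
--     for match in matches:
--         if match[0]: continue
--         name = match[1] or match[2]
--         if not name: continue
--         sql_pyformat_repl[name] = '%%(%s)s' % name
--     pyformat_sql = template.substitute(sql_pyformat_repl)
--     return pyformat_sql, params
-- ===== SOURCE B (Python) =====
-- def __convert_params_pyformat(sql, params):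
--     # Hand-written single-pass scanner: no regex, no substitution dict.
--     out = []
--     i = 0
--     n = len(sql)
--     while i < n:
--         c = sql[i]
--         if c != '$':
--             out.append(c)
--             i += 1
--             continue
--         i += 1
--         if i < n and sql[i] == '$':
--             out.append('$')
--             i += 1
--         elif i < n and sql[i] == '{':
--             j = i + 1
--             if j < n and (sql[j].isalpha() or sql[j] == '_'):
--                 k = j + 1
--                 while k < n and (sql[k].isalnum() or sql[k] == '_'):
--                     k += 1
--                 if k < n and sql[k] == '}':
--                     out.append('%%(%s)s' % sql[j:k])
--                     i = k + 1
--                 else: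
--                     raise ValueError('Invalid placeholder in string')
--             else:
--                 raise ValueError('Invalid placeholder in string')
--         elif i < n and (sql[i].isalpha() or sql[i] == '_'):
--             k = i + 1
--             while k < n and (sql[k].isalnum() or sql[k] == '_'):
--                 k += 1
--             out.append('%%(%s)s' % sql[i:k])
--             i = k
--         else:
--             raise ValueError('Invalid placeholder in string')
--     return ''.join(out), params
-- ===== Notes on version B (the rewrite author's own statement) =====
-- stated objective: alternative
-- what changed: Replaces A's two regex passes (Template.pattern.findall collecting names into a substitution dict, then Template.substitute) with a single hand-written character scan that emits each replacement directly, using no regex and no dict.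
import Mathlib
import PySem

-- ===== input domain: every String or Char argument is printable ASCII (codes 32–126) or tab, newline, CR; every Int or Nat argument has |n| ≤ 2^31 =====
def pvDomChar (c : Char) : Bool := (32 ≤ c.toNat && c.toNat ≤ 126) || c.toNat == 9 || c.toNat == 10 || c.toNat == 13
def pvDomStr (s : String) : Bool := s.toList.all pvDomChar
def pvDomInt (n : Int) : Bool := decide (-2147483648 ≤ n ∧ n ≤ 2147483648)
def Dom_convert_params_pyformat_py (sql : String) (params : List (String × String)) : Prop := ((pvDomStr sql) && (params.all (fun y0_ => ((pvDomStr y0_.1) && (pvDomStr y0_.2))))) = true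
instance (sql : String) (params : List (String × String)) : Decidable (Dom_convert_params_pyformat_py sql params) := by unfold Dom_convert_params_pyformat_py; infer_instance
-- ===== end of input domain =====

-- B replaces A's two regex passes (findall building a substitution dict, then
-- Template.substitute) with one hand-written scan over the characters that emits
-- each replacement directly (objective: alternative — same cost, no regex machinery).

-- Shared tiny character predicates ('[_a-zA-Z]' / '[_a-zA-Z0-9]', exact on ASCII)
def identStart (c : Char) : Bool := c.isAlpha || c == '_'
def identCont (c : Char) : Bool := c.isAlphanum || c == '_'
-- '%%(%s)s' % name
def pyFmt (n : List Char) : List Char := '%' :: '(' :: (n ++ [')', 's'])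

-- ===== PORT A =====
-- Port of string.Template's compiled regex: classify the match at the head of the
-- character list. Exact for \$(?:(?P<escaped>\$)|(?P<named>id)|{(?P<braced>id)}|(?P<invalid>))
-- with id = [_a-zA-Z][_a-zA-Z0-9]* (IGNORECASE), on the ASCII domain.
inductive PyTok
  | lit : Char → PyTok          -- ordinary character (no match at this position)
  | esc : PyTok                 -- '$$'  (group 'escaped')
  | ph  : List Char → PyTok     -- '$name' or '${name}' (groups 'named'/'braced')
  | bad : PyTok                 -- ill-formed '$…' (group 'invalid'; consumes only '$')
deriving DecidableEq, Repr

def tmplStep : List Char → Option (PyTok × List Char)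
  | [] => none
  | c :: rest =>
    if c = '$' then
      match rest with
      | [] => some (.bad, rest)
      | c2 :: r =>
        if c2 = '$' then some (.esc, r)
        else if c2 = '{' then
          match r with
          | [] => some (.bad, rest)
          | c3 :: r2 =>
            if identStart c3 then
              match r2.dropWhile identCont with
              | '}' :: r3 => some (.ph (c3 :: r2.takeWhile identCont), r3)
              | _ => some (.bad, rest)
            else some (.bad, rest)
        else if identStart c2 then some (.ph (c2 :: r.takeWhile identCont), r.dropWhile identCont)
        else some (.bad, rest)
    else some (.lit c, rest)

theorem tmplStep_length {cs r : List Char} {t : PyTok} (h : tmplStep cs = some (t, r)) :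
    r.length < cs.length := by
  cases cs with
  | nil => simp [tmplStep] at h
  | cons c rest =>
    simp only [tmplStep] at h
    split at h
    · cases rest with
      | nil => simp_all
      | cons c2 r2 =>
        simp only at h
        split at h
        · cases h; simp
        · split at h
          · cases r2 with
            | nil => simp_all
            | cons c3 r3 =>
              simp only at h
              split at h
              · split at h
                · rename_i heq
                  cases h
                  have h1 := List.length_dropWhile_le (p := identCont) (l := r3)
                  rw [heq] at h1
                  simp at h1 ⊢
                  omega
                · cases h; simp
              · cases h; simp
          · split at h
            · cases h
              have h1 := List.length_dropWhile_le (p := identCont) (l := r2)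
              simp
              omega
            · cases h; simp
    · cases h; simp

-- template.pattern.findall(template.template): the list of matches ('.lit' positions
-- are no match and do not appear).
def findallA (cs : List Char) : List PyTok :=
  match h : tmplStep cs with
  | none => []
  | some (.lit _, r) => findallA r
  | some (t, r) => t :: findallA r
termination_by cs.length
decreasing_by all_goals exact tmplStep_length h

-- the body of A's for-loop over matches: skip escaped ('if match[0]'), skip empty name
-- ('if not name', the invalid group), insert '%(name)s' otherwise
def replStep (d : PySem.Dict (List Char) (List Char)) (m : PyTok) :
    PySem.Dict (List Char) (List Char) :=
  match m with
  | .esc => d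
  | .bad => d
  | .lit _ => d          -- unreachable: findallA produces no .lit
  | .ph n => d.insert n (pyFmt n)

def buildRepl (ms : List PyTok) : PySem.Dict (List Char) (List Char) :=
  ms.foldl replStep PySem.Dict.empty

-- template.substitute(sql_pyformat_repl): the second regex pass with dict lookup.
-- KeyError is unreachable (the findall loop inserted every placeholder name);
-- on .bad Python raises ValueError — those inputs are excluded by Pre_.
def substA (d : PySem.Dict (List Char) (List Char)) (cs : List Char) : List Char :=
  match h : tmplStep cs with
  | none => []
  | some (.lit c, r) => c :: substA d r
  | some (.esc, r) => '$' :: substA d r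
  | some (.ph n, r) => d.getD n [] ++ substA d r
  | some (.bad, r) => substA d r
termination_by cs.length
decreasing_by all_goals exact tmplStep_length h

def convert_params_pyformat_py (sql : String) (params : List (String × String)) :
    String × (List (String × String)) :=
  let t := sql.toList
  ((substA (buildRepl (findallA t)) t).asString, params)

-- ===== PORT B =====
-- Source B's while-loop over indices, as a tail recursion over the remaining characters;
-- 'out' (a list of appended pieces joined at the end) is the reversed accumulator 'acc'.
-- Where Python B raises ValueError (ill-formed '$…', excluded by Pre_) the port stops
-- and returns the output so far (arbitrary: outside the claim).
def subBAux (acc : List Char) : List Char → List Char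
  | [] => acc.reverse
  | c :: rest =>
    if c = '$' then
      match rest with
      | [] => acc.reverse                                   -- ValueError
      | c2 :: r =>
        if c2 = '$' then subBAux ('$' :: acc) r
        else if c2 = '{' then
          match r with
          | [] => acc.reverse                               -- ValueError
          | c3 :: r2 =>
            if identStart c3 then
              match hdw : r2.dropWhile identCont with
              | '}' :: r3 =>
                  subBAux ((pyFmt (c3 :: r2.takeWhile identCont)).reverse ++ acc) r3
              | _ => acc.reverse                            -- ValueError
            else acc.reverse                                -- ValueError
        else if identStart c2 then
          subBAux ((pyFmt (c2 :: r.takeWhile identCont)).reverse ++ acc) (r.dropWhile identCont)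
        else acc.reverse                                    -- ValueError
    else subBAux (c :: acc) rest
termination_by cs => cs.length
decreasing_by
  all_goals
    first
      | (have h1 := List.length_dropWhile_le (p := identCont) (l := r2)
         rw [hdw] at h1
         simp only [List.length_cons] at h1 ⊢
         omega)
      | (have h1 := List.length_dropWhile_le (p := identCont) (l := r)
         simp only [List.length_cons]
         omega)
      | (simp only [List.length_cons]; omega)

def convert_params_pyformat_py_alt (sql : String) (params : List (String × String)) :
    String × (List (String × String)) :=
  ((subBAux [] sql.toList).asString, params)

-- ===== PRECONDITION & SPEC =====
-- Pre_ excludes exactly the sql with an ill-formed '$' placeholder, on which A's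
-- Template.substitute raises ValueError (B raises ValueError there too).
-- Stated as a finite automaton over the characters (well-formedness of '$'
-- placeholders), structurally recursive so that it is kernel-decidable.
inductive ScanSt
  | normal | afterDollar | named | brace0 | braceIn
deriving DecidableEq, Repr

def okScan : ScanSt → List Char → Bool
  | .normal, [] => true
  | .named, [] => true
  | .afterDollar, [] => false
  | .brace0, [] => false
  | .braceIn, [] => false
  | .normal, c :: r => if c = '$' then okScan .afterDollar r else okScan .normal r
  | .afterDollar, c :: r =>
      if c = '$' then okScan .normal r
      else if c = '{' then okScan .brace0 r
      else if identStart c then okScan .named r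
      else false
  | .named, c :: r =>
      if identCont c then okScan .named r
      else if c = '$' then okScan .afterDollar r
      else okScan .normal r
  | .brace0, c :: r => if identStart c then okScan .braceIn r else false
  | .braceIn, c :: r =>
      if identCont c then okScan .braceIn r
      else if c = '}' then okScan .normal r
      else false

def Pre_convert_params_pyformat_py (sql : String) (params : List (String × String)) : Prop :=
  okScan .normal sql.toList = true
instance (sql : String) (params : List (String × String)) : Decidable (Pre_convert_params_pyformat_py sql params) := by unfold Pre_convert_params_pyformat_py; infer_instance

def pvWitness_convert_params_pyformat_py : String × (List (String × String)) :=
  ("a $x ${y_1} $$%", [("x", "1")])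

def Spec_convert_params_pyformat_py (sql : String) (params : List (String × String)) (out : String × (List (String × String))) : Prop := out = convert_params_pyformat_py_alt sql params
instance (sql : String) (params : List (String × String)) (out : String × (List (String × String))) : Decidable (Spec_convert_params_pyformat_py sql params out) := by unfold Spec_convert_params_pyformat_py; infer_instance

-- ===== CLAIM (what is proved, stated in full; the proofs are below) =====
def Claim_equal_convert_params_pyformat_py : Prop := ∀ (sql : String) (params : List (String × String)), Dom_convert_params_pyformat_py sql params → Pre_convert_params_pyformat_py sql params → Spec_convert_params_pyformat_py sql params (convert_params_pyformat_py sql params)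

-- ===== LEMMAS AND PROOFS =====

-- proof-side restatement of Pre_: no '.bad' token in the tokenization
def okTmpl (cs : List Char) : Bool :=
  match h : tmplStep cs with
  | none => true
  | some (.bad, _) => false
  | some (_, r) => okTmpl r
termination_by cs.length
decreasing_by all_goals exact tmplStep_length h

theorem okScan_braceIn (r2 : List Char) :
    okScan .braceIn r2 =
      (match r2.dropWhile identCont with
       | '}' :: r3 => okScan .normal r3
       | _ => false) := by
  induction r2 with
  | nil => simp [okScan, List.dropWhile]
  | cons c t ih =>
    by_cases hic : identCont c = true
    · simp [okScan, hic, List.dropWhile, ih]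
    · by_cases hb : c = '}'
      · subst hb
        simp [okScan, hic, List.dropWhile]
      · simp [okScan, hic, hb, List.dropWhile]

theorem okScan_named (r : List Char) :
    okScan .named r = okScan .normal (r.dropWhile identCont) := by
  induction r with
  | nil => simp [okScan, List.dropWhile]
  | cons c t ih =>
    by_cases hic : identCont c = true
    · have hcd : ¬ c = '$' := by
        intro h; subst h; simp [identCont, Char.isAlphanum, Char.isAlpha, Char.isDigit] at hic
      simp [okScan, hic, List.dropWhile, ih]
    · simp [okScan, hic, List.dropWhile]

theorem okScan_eq_okTmpl : ∀ (N : Nat) (cs : List Char), cs.length ≤ N →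
    okScan .normal cs = okTmpl cs := by
  intro N
  induction N with
  | zero =>
    intro cs hlen
    have hnil : cs = [] := by cases cs <;> simp_all
    subst hnil
    simp [okScan, okTmpl, tmplStep]
  | succ N ih =>
    intro cs hlen
    cases cs with
    | nil => simp [okScan, okTmpl, tmplStep]
    | cons c rest =>
      by_cases hc : c = '$'
      · subst hc
        cases rest with
        | nil =>
          have htok : tmplStep ['$'] = some (.bad, ([] : List Char)) := by
            simp [tmplStep]
          rw [okTmpl, htok]
          simp [okScan]
        | cons c2 r =>
          by_cases h2 : c2 = '$'
          · subst h2
            have htok : tmplStep ('$' :: '$' :: r) = some (.esc, r) := by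
              simp [tmplStep]
            rw [okTmpl, htok]
            have hr : r.length ≤ N := by simp at hlen; omega
            simp [okScan, ih r hr]
          · by_cases h3 : c2 = '{'
            · subst h3
              cases r with
              | nil =>
                have htok : tmplStep ['$', '{'] = some (.bad, ['{']) := by
                  simp [tmplStep]
                rw [okTmpl, htok]
                simp [okScan]
              | cons c3 r2 =>
                by_cases h4 : identStart c3 = true
                · have hbr := okScan_braceIn r2
                  cases hdw : r2.dropWhile identCont with
                  | nil =>
                    have htok : tmplStep ('$' :: '{' :: c3 :: r2) = some (.bad, '{' :: c3 :: r2) := by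
                      simp [tmplStep, h4, hdw]
                    rw [okTmpl, htok]
                    rw [hdw] at hbr
                    simp [okScan, h4, hbr]
                  | cons ch r3 =>
                    by_cases h5 : ch = '}'
                    · subst h5
                      have htok : tmplStep ('$' :: '{' :: c3 :: r2) =
                          some (.ph (c3 :: r2.takeWhile identCont), r3) := by
                        simp [tmplStep, h4, hdw]
                      rw [okTmpl, htok]
                      rw [hdw] at hbr
                      have hr3 : r3.length ≤ N := by
                        have h1 := List.length_dropWhile_le (p := identCont) (l := r2)
                        rw [hdw] at h1
                        simp at hlen h1
                        omega
                      simp only at hbr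
                      simp [okScan, h4, hbr, ih r3 hr3]
                    · have htok : tmplStep ('$' :: '{' :: c3 :: r2) = some (.bad, '{' :: c3 :: r2) := by
                        simp [tmplStep, h4, hdw, h5]
                      rw [okTmpl, htok]
                      rw [hdw] at hbr
                      have hm : (match ch :: r3 with
                          | '}' :: r3 => okScan ScanSt.normal r3
                          | _ => false) = false := by
                        cases ch
                        simp_all
                      rw [hm] at hbr
                      simp [okScan, h4, hbr]
                · have htok : tmplStep ('$' :: '{' :: c3 :: r2) = some (.bad, '{' :: c3 :: r2) := by
                    simp [tmplStep, h4]
                  rw [okTmpl, htok]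
                  simp [okScan, h4]
            · by_cases h4 : identStart c2 = true
              · have htok : tmplStep ('$' :: c2 :: r) =
                    some (.ph (c2 :: r.takeWhile identCont), r.dropWhile identCont) := by
                  simp [tmplStep, h2, h3, h4]
                rw [okTmpl, htok]
                have hrd : (r.dropWhile identCont).length ≤ N := by
                  have h1 := List.length_dropWhile_le (p := identCont) (l := r)
                  simp at hlen
                  omega
                simp [okScan, h2, h3, h4, okScan_named r, ih _ hrd]
              · have htok : tmplStep ('$' :: c2 :: r) = some (.bad, c2 :: r) := by
                  simp [tmplStep, h2, h3, h4]
                rw [okTmpl, htok]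
                simp [okScan, h2, h3, h4]
      · have htok : tmplStep (c :: rest) = some (.lit c, rest) := by
          simp [tmplStep, hc]
        rw [okTmpl, htok]
        have hr : rest.length ≤ N := by simp at hlen; omega
        simp [okScan, hc, ih rest hr]

theorem buildRepl_aux : ∀ (ms : List PyTok) (d : PySem.Dict (List Char) (List Char)) (n : List Char),
    (∀ k v, d.get? k = some v → v = pyFmt k) →
    (PyTok.ph n ∈ ms ∨ d.get? n = some (pyFmt n)) →
    (ms.foldl replStep d).get? n = some (pyFmt n) := by
  intro ms
  induction ms with
  | nil =>
    intro d n hg hmem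
    rcases hmem with h | h
    · simp at h
    · simpa using h
  | cons m t iht =>
    intro d n hg hmem
    rw [List.foldl_cons]
    apply iht
    · intro k v hk
      cases m with
      | ph p =>
        simp only [replStep] at hk
        rw [PySem.Dict.get?_insert] at hk
        split at hk
        · rename_i hkp; cases hk; rw [hkp]
        · exact hg k v hk
      | esc => exact hg k v hk
      | bad => exact hg k v hk
      | lit c => exact hg k v hk
    · cases m with
      | ph p =>
        simp only [replStep]
        rcases hmem with hm | hder
        · rcases List.mem_cons.mp hm with he | ht'
          · cases he
            right; exact PySem.Dict.get?_insert_self _ _ _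
          · exact Or.inl ht'
        · by_cases hnp : n = p
          · subst hnp; right; exact PySem.Dict.get?_insert_self _ _ _
          · right; rw [PySem.Dict.get?_insert]; simp only [if_neg hnp]; exact hder
      | esc =>
        rcases hmem with hm | hder
        · rcases List.mem_cons.mp hm with he | ht'
          · cases he
          · exact Or.inl ht'
        · exact Or.inr hder
      | bad =>
        rcases hmem with hm | hder
        · rcases List.mem_cons.mp hm with he | ht'
          · cases he
          · exact Or.inl ht'
        · exact Or.inr hder
      | lit c =>
        rcases hmem with hm | hder
        · rcases List.mem_cons.mp hm with he | ht'
          · cases he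
          · exact Or.inl ht'
        · exact Or.inr hder

theorem buildRepl_get {ms : List PyTok} {n : List Char} (hm : PyTok.ph n ∈ ms) :
    (buildRepl ms).get? n = some (pyFmt n) := by
  refine buildRepl_aux ms PySem.Dict.empty n ?_ (Or.inl hm)
  intro k v hk
  rw [PySem.Dict.get?_empty] at hk
  cases hk

-- the bridge: on an okTmpl string whose placeholders are all in d with their pyFmt
-- values, B's one-pass scanner produces acc.reverse ++ (A's substitute result).
theorem subBAux_eq : ∀ (N : Nat) (cs : List Char), cs.length ≤ N →
    ∀ d : PySem.Dict (List Char) (List Char),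
    okTmpl cs = true →
    (∀ n, PyTok.ph n ∈ findallA cs → d.get? n = some (pyFmt n)) →
    ∀ acc : List Char, subBAux acc cs = acc.reverse ++ substA d cs := by
  intro N
  induction N with
  | zero =>
    intro cs hlen d _ _ acc
    have hnil : cs = [] := by cases cs <;> simp_all
    subst hnil
    simp [subBAux, substA, tmplStep]
  | succ N ih =>
    intro cs hlen d hok hd acc
    cases cs with
    | nil => simp [subBAux, substA, tmplStep]
    | cons c rest =>
      by_cases hc : c = '$'
      · subst hc
        cases rest with
        | nil =>
          exfalso
          have htok : tmplStep ['$'] = some (.bad, ([] : List Char)) := by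
            simp [tmplStep]
          rw [okTmpl, htok] at hok
          simp at hok
        | cons c2 r =>
          by_cases h2 : c2 = '$'
          · subst h2
            have htok : tmplStep ('$' :: '$' :: r) = some (.esc, r) := by
              simp [tmplStep]
            rw [okTmpl, htok] at hok
            rw [findallA, htok] at hd
            simp only at hok hd
            have hr : r.length ≤ N := by simp at hlen; omega
            have hrec := ih r hr d hok (fun n hn => hd n (List.mem_cons_of_mem _ hn)) ('$' :: acc)
            rw [substA, htok, subBAux.eq_def]
            simp [hrec]
          · by_cases h3 : c2 = '{'
            · subst h3
              cases r with
              | nil =>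
                exfalso
                have htok : tmplStep ['$', '{'] = some (.bad, ['{']) := by
                  simp [tmplStep]
                rw [okTmpl, htok] at hok
                simp at hok
              | cons c3 r2 =>
                by_cases h4 : identStart c3 = true
                · cases hdw : r2.dropWhile identCont with
                  | nil =>
                    exfalso
                    have htok : tmplStep ('$' :: '{' :: c3 :: r2) = some (.bad, '{' :: c3 :: r2) := by
                      simp [tmplStep, h4, hdw]
                    rw [okTmpl, htok] at hok
                    simp at hok
                  | cons ch r3 =>
                    by_cases h5 : ch = '}'
                    · subst h5
                      have htok : tmplStep ('$' :: '{' :: c3 :: r2) =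
                          some (.ph (c3 :: r2.takeWhile identCont), r3) := by
                        simp [tmplStep, h4, hdw]
                      rw [okTmpl, htok] at hok
                      rw [findallA, htok] at hd
                      simp only at hok hd
                      have hr3 : r3.length ≤ N := by
                        have h1 := List.length_dropWhile_le (p := identCont) (l := r2)
                        rw [hdw] at h1
                        simp at hlen h1
                        omega
                      have hrec := ih r3 hr3 d hok
                        (fun n hn => hd n (List.mem_cons_of_mem _ hn))
                        ((pyFmt (c3 :: r2.takeWhile identCont)).reverse ++ acc)
                      have hget := hd _ List.mem_cons_self
                      rw [substA, htok, subBAux.eq_def]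
                      simp [h4, PySem.Dict.getD_eq_get?_getD, hget]
                      split
                      · rename_i r3' heq
                        rw [hdw] at heq
                        injection heq with _ h
                        subst h
                        rw [hrec]
                        simp
                      · simp_all
                    · exfalso
                      have htok : tmplStep ('$' :: '{' :: c3 :: r2) = some (.bad, '{' :: c3 :: r2) := by
                        simp [tmplStep, h4, hdw, h5]
                      rw [okTmpl, htok] at hok
                      simp at hok
                · exfalso
                  have htok : tmplStep ('$' :: '{' :: c3 :: r2) = some (.bad, '{' :: c3 :: r2) := by
                    simp [tmplStep, h4]
                  rw [okTmpl, htok] at hok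
                  simp at hok
            · by_cases h4 : identStart c2 = true
              · have htok : tmplStep ('$' :: c2 :: r) =
                    some (.ph (c2 :: r.takeWhile identCont), r.dropWhile identCont) := by
                  simp [tmplStep, h2, h3, h4]
                rw [okTmpl, htok] at hok
                rw [findallA, htok] at hd
                simp only at hok hd
                have hrd : (r.dropWhile identCont).length ≤ N := by
                  have h1 := List.length_dropWhile_le (p := identCont) (l := r)
                  simp at hlen
                  omega
                have hrec := ih (r.dropWhile identCont) hrd d hok
                  (fun n hn => hd n (List.mem_cons_of_mem _ hn))
                  ((pyFmt (c2 :: r.takeWhile identCont)).reverse ++ acc)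
                have hget := hd _ List.mem_cons_self
                rw [substA, htok, subBAux.eq_def]
                simp [h2, h3, h4, hrec, PySem.Dict.getD_eq_get?_getD, hget]
              · exfalso
                have htok : tmplStep ('$' :: c2 :: r) = some (.bad, c2 :: r) := by
                  simp [tmplStep, h2, h3, h4]
                rw [okTmpl, htok] at hok
                simp at hok
      · have htok : tmplStep (c :: rest) = some (.lit c, rest) := by
          simp [tmplStep, hc]
        rw [okTmpl, htok] at hok
        rw [findallA, htok] at hd
        have hr : rest.length ≤ N := by simp at hlen; omega
        have hrec := ih rest hr d hok hd (c :: acc)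
        rw [substA, htok, subBAux.eq_def]
        simp [hc, hrec]

-- ===== VERDICT (by name: the statement is the Claim_ definition above) =====
theorem convert_params_pyformat_py_spec : Claim_equal_convert_params_pyformat_py := by
  intro sql params _ hpre
  unfold Spec_convert_params_pyformat_py convert_params_pyformat_py convert_params_pyformat_py_alt
  have hok : okTmpl sql.toList = true := by
    rw [← okScan_eq_okTmpl sql.toList.length sql.toList le_rfl]
    exact hpre
  have h := subBAux_eq sql.toList.length sql.toList le_rfl
      (buildRepl (findallA sql.toList)) hok (fun n hm => buildRepl_get hm) []
  rw [h]
  simp
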